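-- pv_equiv track=rewrite | github.com/uucyce/vetka-mcp-full | scripts/localguys.py | _resolve_method
-- ===== SOURCE A (Python) =====
-- from typing import Any, Callable, Dict, List, Optional
--
-- def _resolve_method(method_or_family: str, rows: List[Dict[str, Any]]) -> Dict[str, Any]:
--     needle = str(method_or_family or "").strip().lower()
--     for row in rows:
--         if needle == str(row.get("method") or "").strip().lower():
--             return row
--         if needle == str(row.get("workflow_family") or "").strip().lower():
--             return row
--     raise ValueError(f"Unsupported localguys method '{method_or_family}'")
-- ===== SOURCE B (Python) =====
-- def _resolve_method(method_or_family, rows):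
--     index = {}
--     for row in rows:
--         k = str(row.get("method") or "").strip().lower()
--         if k not in index:
--             index[k] = row
--         k = str(row.get("workflow_family") or "").strip().lower()
--         if k not in index:
--             index[k] = row
--     needle = str(method_or_family or "").strip().lower()
--     if needle in index:
--         return index[needle]
--     raise ValueError(f"Unsupported localguys method '{method_or_family}'")
-- ===== Notes on version B (the rewrite author's own statement) =====
-- stated objective: alternative
-- what changed: Replaces the scan-with-early-return over rows by building a first-wins normalized-key -> row index dict in one pass and then doing a single dict lookup of the normalized needle.
import Mathlib
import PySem

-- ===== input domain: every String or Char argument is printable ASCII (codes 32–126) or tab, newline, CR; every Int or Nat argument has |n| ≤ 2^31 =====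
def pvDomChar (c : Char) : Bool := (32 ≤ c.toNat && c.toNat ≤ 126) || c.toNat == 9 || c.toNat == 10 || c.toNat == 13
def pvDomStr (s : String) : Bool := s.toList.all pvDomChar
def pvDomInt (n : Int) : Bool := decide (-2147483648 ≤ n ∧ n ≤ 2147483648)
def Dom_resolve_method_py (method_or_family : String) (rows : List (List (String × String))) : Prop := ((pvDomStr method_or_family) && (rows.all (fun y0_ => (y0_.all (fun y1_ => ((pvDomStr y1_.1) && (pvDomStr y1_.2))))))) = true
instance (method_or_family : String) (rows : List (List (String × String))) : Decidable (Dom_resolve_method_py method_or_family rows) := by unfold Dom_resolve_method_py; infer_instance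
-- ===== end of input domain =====

-- B builds a first-wins normalized-key index dict once and answers by one lookup, instead of A's
-- scan with early return; alternative decomposition, same cost; return-value equivalence only
-- (neither version mutates its arguments).

-- normalized key: str(row.get(field) or "").strip().lower()  (shared normalization helper)
def rmKey (row : List (String × String)) (field : String) : String :=
  PySem.Str.lower (PySem.Str.strip (((PySem.Dict.mk row).get? field).getD ""))

-- ===== PORT A =====
-- the for-loop with two early returns, as structural recursion; the raise branch is outside Pre_
def rmScan (needle : String) : List (List (String × String)) → List (String × String)
  | [] => []
  | row :: rest =>
    if needle = rmKey row "method" then row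
    else if needle = rmKey row "workflow_family" then row
    else rmScan needle rest

def resolve_method_py (method_or_family : String) (rows : List (List (String × String))) : List (String × String) :=
  rmScan (PySem.Str.lower (PySem.Str.strip method_or_family)) rows

-- ===== PORT B =====
-- one loop iteration of the index build: insert method key then workflow_family key if absent
def rmStep (d : PySem.Dict String (List (String × String))) (row : List (String × String)) :
    PySem.Dict String (List (String × String)) :=
  let k1 := rmKey row "method"
  let d1 := if d.contains k1 then d else d.insert k1 row
  let k2 := rmKey row "workflow_family"
  if d1.contains k2 then d1 else d1.insert k2 row

def resolve_method_py_alt (method_or_family : String) (rows : List (List (String × String))) : List (String × String) :=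
  let index := rows.foldl rmStep PySem.Dict.empty
  let needle := PySem.Str.lower (PySem.Str.strip method_or_family)
  ((index.get? needle).getD [])

-- ===== PRECONDITION & SPEC =====
-- Pre_ excludes exactly the inputs where no row matches: there Python A (and B) raise ValueError.
def Pre_resolve_method_py (method_or_family : String) (rows : List (List (String × String))) : Prop :=
  (rows.any (fun row =>
    PySem.Str.lower (PySem.Str.strip method_or_family) == rmKey row "method" ||
    PySem.Str.lower (PySem.Str.strip method_or_family) == rmKey row "workflow_family")) = true
instance (method_or_family : String) (rows : List (List (String × String))) : Decidable (Pre_resolve_method_py method_or_family rows) := by unfold Pre_resolve_method_py; infer_instance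

def pvWitness_resolve_method_py : String × (List (List (String × String))) :=
  (" A", [[("method", "a"), ("workflow_family", "b")]])

def Spec_resolve_method_py (method_or_family : String) (rows : List (List (String × String))) (out : List (String × String)) : Prop := out = resolve_method_py_alt method_or_family rows
instance (method_or_family : String) (rows : List (List (String × String))) (out : List (String × String)) : Decidable (Spec_resolve_method_py method_or_family rows out) := by unfold Spec_resolve_method_py; infer_instance

-- ===== CLAIM (what is proved, stated in full; the proofs are below) =====
def Claim_equal_resolve_method_py : Prop := ∀ (method_or_family : String) (rows : List (List (String × String))), Dom_resolve_method_py method_or_family rows → Pre_resolve_method_py method_or_family rows → Spec_resolve_method_py method_or_family rows (resolve_method_py method_or_family rows)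

-- ===== LEMMAS AND PROOFS =====

-- a binding already present at `needle` survives one build step
lemma rmStep_pres (needle : String) (d : PySem.Dict String (List (String × String)))
    (row : List (String × String)) (h : (d.get? needle).isSome) :
    (rmStep d row).get? needle = d.get? needle := by
  unfold rmStep
  have hc : d.contains needle = true := by
    rw [PySem.Dict.contains_eq_isSome_get?, h]
  by_cases h1 : d.contains (rmKey row "method")
  · simp only [h1, if_true]
    by_cases h2 : d.contains (rmKey row "workflow_family")
    · simp [h2]
    · have hne : needle ≠ rmKey row "workflow_family" := by
        intro he; rw [he] at hc; simp [h2] at hc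
      simp [h2, PySem.Dict.get?_insert_of_ne _ _ hne]
  · have hne1 : needle ≠ rmKey row "method" := by
      intro he; rw [he] at hc; simp [h1] at hc
    have hg1 : (d.insert (rmKey row "method") row).get? needle = d.get? needle :=
      PySem.Dict.get?_insert_of_ne _ _ hne1
    have hc1 : (d.insert (rmKey row "method") row).contains needle = true := by
      rw [PySem.Dict.contains_eq_isSome_get?, hg1, h]
    simp only [h1]
    by_cases h2 : (d.insert (rmKey row "method") row).contains (rmKey row "workflow_family")
    · simp [h2, hg1]
    · have hne2 : needle ≠ rmKey row "workflow_family" := by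
        intro he; rw [he] at hc1; simp [h2] at hc1
      simp [h2, PySem.Dict.get?_insert_of_ne _ _ hne2, hg1]

-- and hence the whole remaining build loop
lemma foldl_pres (needle : String) (rows : List (List (String × String)))
    (d : PySem.Dict String (List (String × String))) (h : (d.get? needle).isSome) :
    (rows.foldl rmStep d).get? needle = d.get? needle := by
  induction rows generalizing d with
  | nil => rfl
  | cons row rest ih =>
    simp only [List.foldl_cons]
    rw [ih (rmStep d row) (by rw [rmStep_pres needle d row h]; exact h),
        rmStep_pres needle d row h]

-- the index lookup computes exactly A's first-match scan, for any accumulator not yet holding needle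
lemma rm_main (needle : String) (rows : List (List (String × String)))
    (d : PySem.Dict String (List (String × String))) (h : d.get? needle = none) :
    ((rows.foldl rmStep d).get? needle).getD [] = rmScan needle rows := by
  induction rows generalizing d with
  | nil => simp [rmScan, h]
  | cons row rest ih =>
    simp only [List.foldl_cons, rmScan]
    have hnc : d.contains needle = false := by
      rw [PySem.Dict.contains_eq_isSome_get?, h]; rfl
    by_cases h1 : needle = rmKey row "method"
    · have hc1 : d.contains (rmKey row "method") = false := h1 ▸ hnc
      have hg : (rmStep d row).get? needle = some row := by
        unfold rmStep
        simp only [hc1]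
        have hgi : (d.insert (rmKey row "method") row).get? needle = some row := by
          rw [h1]; exact PySem.Dict.get?_insert_self _ _ _
        by_cases h2 : (d.insert (rmKey row "method") row).contains (rmKey row "workflow_family")
        · simp [h2, hgi]
        · by_cases he : needle = rmKey row "workflow_family"
          · exfalso
            rw [PySem.Dict.contains_eq_isSome_get?, ← he, hgi] at h2
            simp at h2
          · simp [h2, PySem.Dict.get?_insert_of_ne _ _ he, hgi]
      rw [foldl_pres needle rest _ (by rw [hg]; rfl), hg]
      simp [h1]
    · have hg1 : (if d.contains (rmKey row "method") then d
          else d.insert (rmKey row "method") row).get? needle = none := by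
        by_cases hc : d.contains (rmKey row "method")
        · simpa [hc]
        · simp [hc, PySem.Dict.get?_insert_of_ne _ _ h1, h]
      by_cases h2 : needle = rmKey row "workflow_family"
      · have hg : (rmStep d row).get? needle = some row := by
          unfold rmStep
          have hc2 : (if d.contains (rmKey row "method") then d
              else d.insert (rmKey row "method") row).contains (rmKey row "workflow_family") = false := by
            rw [PySem.Dict.contains_eq_isSome_get?, ← h2, hg1]; rfl
          simp only [hc2, Bool.false_eq_true, if_false]
          rw [h2]; exact PySem.Dict.get?_insert_self _ _ _
        rw [foldl_pres needle rest _ (by rw [hg]; rfl), hg]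
        simp [h2]
      · have hg : (rmStep d row).get? needle = none := by
          unfold rmStep
          by_cases hc2 : (if d.contains (rmKey row "method") then d
              else d.insert (rmKey row "method") row).contains (rmKey row "workflow_family")
          · simpa [hc2] using hg1
          · simp [hc2, PySem.Dict.get?_insert_of_ne _ _ h2, hg1]
        rw [ih _ hg]
        simp [h1, h2]

-- ===== VERDICT (by name: the statement is the Claim_ definition above) =====
theorem resolve_method_py_spec : Claim_equal_resolve_method_py := by
  intro m rows _ _
  unfold Spec_resolve_method_py resolve_method_py resolve_method_py_alt
  exact (rm_main _ rows PySem.Dict.empty (PySem.Dict.get?_empty _)).symm
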